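-- pv_equiv track=rewrite | github.com/coldfront96/new_game_plus | src/rules_engine/linked_entity.py | familiar_int_score
-- ===== SOURCE A (Python) =====
-- _FAMILIAR_INT_TABLE: list[tuple[int, int]] = [
--     (1,  6), (3,  7), (5,  8), (7,  9), (9,  10),
--     (11, 11), (13, 12), (15, 13), (17, 14), (19, 15),
-- ]
--
-- def familiar_int_score(master_class_levels: int) -> int:
--     """Return familiar Intelligence score per PHB table.
--
--     Levels 1-2→6, 3-4→7, 5-6→8, 7-8→9, 9-10→10,
--     11-12→11, 13-14→12, 15-16→13, 17-18→14, 19-20→15.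
--     Clamps input to [1, 20].
--     """
--     lvl = max(1, min(20, master_class_levels))
--     result = 6
--     for min_lvl, score in _FAMILIAR_INT_TABLE:
--         if lvl >= min_lvl:
--             result = score
--         else:
--             break
--     return result
-- ===== SOURCE B (Python) =====
-- def familiar_int_score(master_class_levels: int) -> int:
--     lvl = max(1, min(20, master_class_levels))
--     return 6 + (lvl - 1) // 2
-- ===== Notes on version B (the rewrite author's own statement) =====
-- stated objective: simpler
-- what changed: Replaces the table scan with early break by a closed-form arithmetic formula after the same clamp, dropping the lookup table entirely.
import Mathlib
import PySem

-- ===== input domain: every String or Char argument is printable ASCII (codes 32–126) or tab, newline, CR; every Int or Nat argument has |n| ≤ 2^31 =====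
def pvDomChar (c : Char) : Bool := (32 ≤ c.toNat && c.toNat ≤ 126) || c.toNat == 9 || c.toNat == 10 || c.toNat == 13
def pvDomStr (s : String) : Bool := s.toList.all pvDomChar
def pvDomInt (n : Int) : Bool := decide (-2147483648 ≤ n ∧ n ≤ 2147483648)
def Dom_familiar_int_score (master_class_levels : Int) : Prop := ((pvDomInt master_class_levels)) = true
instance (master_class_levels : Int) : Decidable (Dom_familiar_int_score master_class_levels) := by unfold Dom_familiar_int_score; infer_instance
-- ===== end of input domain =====

-- B replaces A's table scan with the closed-form 6 + (lvl-1)//2 after the same clamp (objective: simpler).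

-- ===== PORT A =====
def pvFamiliarIntTable : List (Int × Int) :=
  [(1, 6), (3, 7), (5, 8), (7, 9), (9, 10),
   (11, 11), (13, 12), (15, 13), (17, 14), (19, 15)]

-- loop with break: state = (result, broken)
def pvLoopA (lvl : Int) : List (Int × Int) → Int → Int
  | [], result => result
  | (min_lvl, score) :: rest, result =>
    if lvl ≥ min_lvl then pvLoopA lvl rest score
    else result

def familiar_int_score (master_class_levels : Int) : Int :=
  let lvl := max 1 (min 20 master_class_levels)
  pvLoopA lvl pvFamiliarIntTable 6

-- ===== PORT B =====
def familiar_int_score_alt (master_class_levels : Int) : Int :=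
  let lvl := max 1 (min 20 master_class_levels)
  6 + PySem.Int.floordiv (lvl - 1) 2

-- ===== PRECONDITION & SPEC =====
def Spec_familiar_int_score (master_class_levels : Int) (out : Int) : Prop := out = familiar_int_score_alt master_class_levels
instance (master_class_levels : Int) (out : Int) : Decidable (Spec_familiar_int_score master_class_levels out) := by unfold Spec_familiar_int_score; infer_instance

-- ===== CLAIM (what is proved, stated in full; the proofs are below) =====
def Claim_equal_familiar_int_score : Prop := ∀ (master_class_levels : Int), Dom_familiar_int_score master_class_levels → Spec_familiar_int_score master_class_levels (familiar_int_score master_class_levels)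

-- ===== LEMMAS AND PROOFS =====
theorem familiar_eq_on_clamped (lvl : Int) (h1 : 1 ≤ lvl) (h2 : lvl ≤ 20) :
    pvLoopA lvl pvFamiliarIntTable 6 = 6 + PySem.Int.floordiv (lvl - 1) 2 := by
  interval_cases lvl <;> decide

-- ===== VERDICT (by name: the statement is the Claim_ definition above) =====
theorem familiar_int_score_spec : Claim_equal_familiar_int_score := by
  intro n _
  unfold Spec_familiar_int_score familiar_int_score familiar_int_score_alt
  simp only []
  rw [familiar_eq_on_clamped]
  · exact le_max_left _ _
  · exact max_le (by norm_num) (min_le_left _ _)
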